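-- pv_equiv track=rewrite | github.com/amshrestha2020/CodeSignal | CodeSignal/Python/MexFunction.py | solution
-- ===== SOURCE A (Python) =====
-- def solution(s, upperBound):
--     found = -1
--     for i in range(upperBound):
--         if not i in s:
--             found = i
--             break
--     else:
--         return upperBound
--
--     return found
-- ===== SOURCE B (Python) =====
-- def solution(s, upperBound):
--     candidate = 0
--     for x in sorted(s):
--         if x < candidate:
--             continue
--         elif x == candidate:
--             candidate += 1
--             if candidate >= upperBound:
--                 break
--         else:
--             break
--     return min(candidate, upperBound)
-- ===== Notes on version B (the rewrite author's own statement) =====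
-- stated objective: alternative
-- what changed: Replaces A's per-index membership probe over range(upperBound) (O(upperBound*|s|)) by sorting s once and making a single forward pass that advances a mex candidate, returning min(candidate, upperBound).
import Mathlib
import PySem

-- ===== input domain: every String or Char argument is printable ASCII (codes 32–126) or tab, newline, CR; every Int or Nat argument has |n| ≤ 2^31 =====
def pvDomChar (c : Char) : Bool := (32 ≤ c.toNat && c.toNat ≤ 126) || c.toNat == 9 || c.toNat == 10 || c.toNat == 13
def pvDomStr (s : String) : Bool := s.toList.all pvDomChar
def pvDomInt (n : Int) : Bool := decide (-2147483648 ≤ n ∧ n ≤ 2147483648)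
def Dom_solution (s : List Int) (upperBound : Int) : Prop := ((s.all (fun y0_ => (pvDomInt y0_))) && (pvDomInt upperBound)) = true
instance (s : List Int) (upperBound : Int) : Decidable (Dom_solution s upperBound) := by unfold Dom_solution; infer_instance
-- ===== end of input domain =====

-- B sorts s and makes one forward pass advancing a mex candidate; no speed claim (alternative algorithm).

-- ===== PORT A =====
-- the for/else loop over range(upperBound): i is the loop counter, the fuel is the number of
-- remaining iterations (range(upperBound) has upperBound.toNat elements); running out of fuel is the
-- loop finishing without break, i.e. Python's else-branch 'return upperBound'
def solutionLoop (s : List Int) (upperBound : Int) : Int → ℕ → Int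
  | _, 0 => upperBound
  | i, Nat.succ fuel => if !s.contains i then i else solutionLoop s upperBound (i + 1) fuel

def solution (s : List Int) (upperBound : Int) : Int :=
  solutionLoop s upperBound 0 upperBound.toNat

-- ===== PORT B =====
-- the for loop over sorted(s) with its breaks, returning the candidate reached
def solutionAltLoop (upperBound : Int) : List Int → Int → Int
  | [], candidate => candidate
  | x :: rest, candidate =>
      if x < candidate then solutionAltLoop upperBound rest candidate
      else if x = candidate then
        let c := candidate + 1
        if c ≥ upperBound then c else solutionAltLoop upperBound rest c
      else candidate

def solution_alt (s : List Int) (upperBound : Int) : Int :=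
  min (solutionAltLoop upperBound (PySem.List.sorted s (fun x => x) false) 0) upperBound

-- ===== PRECONDITION & SPEC =====
def Spec_solution (s : List Int) (upperBound : Int) (out : Int) : Prop := out = solution_alt s upperBound
instance (s : List Int) (upperBound : Int) (out : Int) : Decidable (Spec_solution s upperBound out) := by unfold Spec_solution; infer_instance

-- ===== CLAIM (what is proved, stated in full; the proofs are below) =====
def Claim_equal_solution : Prop := ∀ (s : List Int) (upperBound : Int), Dom_solution s upperBound → Spec_solution s upperBound (solution s upperBound)

-- ===== LEMMAS AND PROOFS =====

-- m is the least non-negative integer not in s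
def IsMex (s : List Int) (m : Int) : Prop :=
  0 ≤ m ∧ m ∉ s ∧ ∀ k : Int, 0 ≤ k → k < m → k ∈ s

theorem exists_mex (s : List Int) : ∃ m, IsMex s m := by
  have hex : ∃ n : ℕ, (n : Int) ∉ s := by
    by_contra h
    push Not at h
    have hinj : Function.Injective (fun n : ℕ => (n : Int)) := fun a b => by simp
    have hsub : (Finset.range (s.length + 1)).image (fun n : ℕ => (n : Int)) ⊆ s.toFinset := by
      intro x hx
      simp only [Finset.mem_image] at hx
      obtain ⟨n, _, rfl⟩ := hx
      simpa using h n
    have hcard := Finset.card_le_card hsub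
    rw [Finset.card_image_of_injective _ hinj, Finset.card_range] at hcard
    have := List.toFinset_card_le s
    omega
  refine ⟨(Nat.find hex : ℕ), ?_, ?_, ?_⟩
  · positivity
  · exact Nat.find_spec hex
  · intro k hk0 hkm
    by_contra hk
    have hk' : (k.toNat : Int) = k := Int.toNat_of_nonneg hk0
    have hlt : k.toNat < Nat.find hex := by omega
    have := Nat.find_min hex hlt
    rw [not_not, hk'] at this
    exact hk this

theorem solutionLoop_eq (s : List Int) (ub m : Int) (hm : IsMex s m)
    (f : ℕ) : ∀ c : Int, 0 ≤ c → c ≤ m → f = (ub - c).toNat →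
    solutionLoop s ub c f = min m ub := by
  induction f with
  | zero =>
    intro c hc0 hcm hf
    rw [solutionLoop]
    omega
  | succ f ih =>
    intro c hc0 hcm hf
    have hcub : c < ub := by omega
    rw [solutionLoop]
    by_cases hce : c = m
    · have hct : s.contains c = false := by subst hce; simpa using hm.2.1
      rw [hct]
      simp only [Bool.not_false, if_pos]
      omega
    · have hclt : c < m := lt_of_le_of_ne hcm hce
      have hct : s.contains c = true := by simpa using hm.2.2 c hc0 hclt
      rw [hct]
      simp only [Bool.not_true, Bool.false_eq_true, if_false]
      exact ih (c + 1) (by omega) (by omega) (by omega)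

theorem solutionAltLoop_eq (ub m : Int) (l : List Int) (hl : l.Pairwise (· ≤ ·)) :
    ∀ c, c ≤ m → m ∉ l → (∀ k : Int, c ≤ k → k < m → k ∈ l) →
    min (solutionAltLoop ub l c) ub = min m ub := by
  induction l with
  | nil =>
    intro c hc hm hk
    have : c = m := by
      by_contra h
      exact absurd (hk c le_rfl (by omega)) (List.not_mem_nil)
    rw [solutionAltLoop, this]
  | cons x rest ih =>
    intro c hc hm hk
    have hrest := (List.pairwise_cons.mp hl).2
    have hxall := (List.pairwise_cons.mp hl).1
    rw [solutionAltLoop]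
    by_cases h1 : x < c
    · simp only [if_pos h1]
      exact ih hrest c hc (fun h => hm (List.mem_cons_of_mem _ h))
        (fun k hck hkm => by
          rcases List.mem_cons.mp (hk k hck hkm) with h | h
          · omega
          · exact h)
    · simp only [if_neg h1]
      by_cases h2 : x = c
      · simp only [if_pos h2]
        have hcm : c ≠ m := by
          intro h; subst h; subst h2; exact hm (List.mem_cons_self)
        have hc1 : c + 1 ≤ m := by omega
        have hm' : m ∉ rest := fun h => hm (List.mem_cons_of_mem _ h)
        have hk' : ∀ k : Int, c + 1 ≤ k → k < m → k ∈ rest := by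
          intro k hck hkm
          rcases List.mem_cons.mp (hk k (by omega) hkm) with h | h
          · omega
          · exact h
        by_cases h3 : c + 1 ≥ ub
        · simp only [if_pos h3]
          omega
        · simp only [if_neg h3]
          exact ih hrest (c + 1) hc1 hm' hk'
      · simp only [if_neg h2]
        have : c = m := by
          by_contra h
          have hcm : c < m := by omega
          have := hk c le_rfl hcm
          rcases List.mem_cons.mp this with h' | h'
          · omega
          · have := hxall c h'
            omega
        rw [this]

theorem solution_spec : Claim_equal_solution := by
  intro s ub _
  unfold Spec_solution solution solution_alt
  obtain ⟨m, hm⟩ := exists_mex s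
  have hA := solutionLoop_eq s ub m hm ub.toNat 0 le_rfl hm.1 (by omega)
  have hsorted := PySem.List.sorted_pairwise (xs := s) (key := fun x => x)
  have hmemeq : ∀ x : Int, x ∈ PySem.List.sorted s (fun x => x) false ↔ x ∈ s :=
    fun x => PySem.List.mem_sorted s (fun x => x) false x
  have hB := solutionAltLoop_eq ub m (PySem.List.sorted s (fun x => x) false)
    (by simpa using hsorted) 0 hm.1
    (fun h => hm.2.1 ((hmemeq m).mp h))
    (fun k hk0 hkm => (hmemeq k).mpr (hm.2.2 k hk0 hkm))
  rw [hA, hB]
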